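-- pv_equiv track=rewrite | github.com/schiob/AlgoritmosSistemas | ago-dic-2024/Max Vazquez/Practica_2.py | max_problems_solved
-- ===== SOURCE A (Python) =====
-- def insertion_sort(arr):
--     # Implementamos el algoritmo Insertion Sort
--     for i in range(1, len(arr)):
--         key = arr[i]
--         j = i - 1
--         # Mover los elementos de arr[0...i-1] que son mayores que key
--         # a una posición adelante de su posición actual
--         while j >= 0 and arr[j] > key:
--             arr[j + 1] = arr[j]
--             j -= 1
--         arr[j + 1] = key
--
-- def max_problems_solved(n, m, problem_times):
--     # Ordenamos los tiempos de los problemas usando Insertion Sort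
--     insertion_sort(problem_times)
--
--     total_time = 0
--     problems_solved = 0
--
--     # Iteramos sobre la lista de tiempos ordenada
--     for time in problem_times:
--         if total_time + time <= m:
--             total_time += time
--             problems_solved += 1
--         else:
--             break
--
--     return problems_solved
-- ===== SOURCE B (Python) =====
-- def max_problems_solved(n, m, problem_times):
--     # Selection-based greedy: never sort; repeatedly pick the cheapest remaining
--     # problem while it fits in the budget. Correct because the optimal greedy
--     # order is nondecreasing cost, and taking the minimum each round consumes
--     # the costs in exactly that order.
--     remaining = list(problem_times)
--     budget = m
--     solved = 0
--     while remaining: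
--         t = min(remaining)
--         if t > budget:
--             break
--         budget -= t
--         solved += 1
--         remaining.remove(t)
--     return solved
-- ===== Notes on version B (the rewrite author's own statement) =====
-- stated objective: alternative
-- what changed: Replaces sort-then-scan (A insertion-sorts the whole list, then accumulates a running total over the sorted prefix) with a selection-based greedy that never sorts: it repeatedly extracts the minimum of the remaining list and subtracts it from the budget until it no longer fits; B also does not mutate problem_times.
import Mathlib
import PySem

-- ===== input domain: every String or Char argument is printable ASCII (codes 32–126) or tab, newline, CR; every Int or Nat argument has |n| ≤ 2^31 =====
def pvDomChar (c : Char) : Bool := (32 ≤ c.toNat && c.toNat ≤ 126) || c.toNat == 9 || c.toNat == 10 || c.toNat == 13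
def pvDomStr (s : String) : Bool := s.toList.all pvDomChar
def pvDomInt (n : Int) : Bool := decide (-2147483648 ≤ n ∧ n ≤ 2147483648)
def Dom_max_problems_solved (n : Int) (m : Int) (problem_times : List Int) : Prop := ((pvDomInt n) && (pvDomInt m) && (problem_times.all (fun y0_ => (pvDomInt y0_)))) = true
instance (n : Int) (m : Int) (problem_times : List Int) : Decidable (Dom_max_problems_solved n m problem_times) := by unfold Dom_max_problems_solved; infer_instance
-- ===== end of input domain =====

-- B replaces A's sort-then-scan by a selection greedy that never sorts: repeatedly take the
-- minimum remaining time while it fits the budget (objective: alternative, similar cost).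
-- A sorts problem_times in place (observable mutation); B does not — the equivalence proved
-- here is about the return value.

-- ===== PORT A =====
-- inner while loop of insertion_sort: `while j >= 0 and arr[j] > key: arr[j+1] = arr[j]; j -= 1`
-- (arr.getD/.set with .toNat are exact here: the Python indices j, j+1 are always in range 0..len-1)
def pvInner (arr : List Int) (key : Int) (j : Int) : List Int × Int :=
  if h : 0 ≤ j ∧ key < arr.getD j.toNat 0 then
    pvInner (arr.set (j + 1).toNat (arr.getD j.toNat 0)) key (j - 1)
  else (arr, j)
termination_by (j + 1).toNat
decreasing_by omega

-- `for i in range(1, len(arr)): key = arr[i]; <inner while>; arr[j+1] = key`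
def pvInsertionSort (arr0 : List Int) : List Int :=
  (PySem.List.pyRange 1 (arr0.length : Int) 1).foldl (fun arr i =>
    let key := arr.getD i.toNat 0
    let r := pvInner arr key (i - 1)
    r.1.set (r.2 + 1).toNat key) arr0

-- `for time in problem_times: if total_time + time <= m: … else: break` with accumulators
def pvGreedy (m : Int) : List Int → Int → Int → Int
  | [], _, cnt => cnt
  | t :: ts, total, cnt =>
    if total + t ≤ m then pvGreedy m ts (total + t) (cnt + 1) else cnt

def max_problems_solved (n : Int) (m : Int) (problem_times : List Int) : Int :=
  pvGreedy m (pvInsertionSort problem_times) 0 0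

-- ===== PORT B =====
-- termination helper for the selection loop (remove? strictly shrinks the list); cited in decreasing_by
theorem pvRemove?_length_lt (xs : List Int) (v : Int) (r : List Int)
    (h : PySem.List.remove? xs v = some r) : r.length < xs.length := by
  have hv : v ∈ xs := by
    by_contra hv
    rw [(PySem.List.remove?_eq_none_iff xs v).mpr hv] at h
    simp at h
  have h3 := PySem.List.remove?_eq_some_erase xs v hv
  rw [h] at h3
  cases Option.some.inj h3
  have h4 := List.length_erase_of_mem hv
  have h5 : 0 < xs.length := List.length_pos_of_mem hv
  omega

-- `while remaining: t = min(remaining); if t > budget: break; budget -= t; solved += 1; remaining.remove(t)`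
def pvSelLoop (remaining : List Int) (budget : Int) (solved : Int) : Int :=
  match PySem.List.min? remaining (fun x => x) with
  | none => solved                               -- `while remaining:` — empty list exits
  | some t =>
    if budget < t then solved                    -- `if t > budget: break`
    else
      match hr : PySem.List.remove? remaining t with
      | none => solved                           -- unreachable: min(remaining) ∈ remaining
      | some rest => pvSelLoop rest (budget - t) (solved + 1)
termination_by remaining.length
decreasing_by exact pvRemove?_length_lt remaining t rest hr

def max_problems_solved_alt (n : Int) (m : Int) (problem_times : List Int) : Int :=
  pvSelLoop problem_times m 0

-- ===== PRECONDITION & SPEC =====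
def Spec_max_problems_solved (n : Int) (m : Int) (problem_times : List Int) (out : Int) : Prop := out = max_problems_solved_alt n m problem_times
instance (n : Int) (m : Int) (problem_times : List Int) (out : Int) : Decidable (Spec_max_problems_solved n m problem_times out) := by unfold Spec_max_problems_solved; infer_instance

-- ===== CLAIM (what is proved, stated in full; the proofs are below) =====
def Claim_equal_max_problems_solved : Prop := ∀ (n : Int) (m : Int) (problem_times : List Int), Dom_max_problems_solved n m problem_times → Spec_max_problems_solved n m problem_times (max_problems_solved n m problem_times)

-- ===== LEMMAS AND PROOFS =====

-- functional meaning of one insertion step: insert k after all elements ≤ k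
def pvIns : List Int → Int → List Int
  | [], k => [k]
  | x :: xs, k => if x ≤ k then x :: pvIns xs k else k :: x :: xs

theorem pvIns_append_gt (p : List Int) (a k : Int) (h : k < a) :
    pvIns (p ++ [a]) k = pvIns p k ++ [a] := by
  induction p with
  | nil => simp [pvIns, not_le.mpr h]
  | cons x xs ih => by_cases hx : x ≤ k <;> simp [pvIns, hx, ih]

theorem pvIns_of_all_le (p : List Int) (k : Int) (h : ∀ x ∈ p, x ≤ k) :
    pvIns p k = p ++ [k] := by
  induction p with
  | nil => rfl
  | cons x xs ih =>
    simp only [pvIns, h x (by simp), if_true]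
    rw [ih (fun y hy => h y (by simp [hy]))]; rfl

theorem pvIns_perm (p : List Int) (k : Int) : (pvIns p k).Perm (k :: p) := by
  induction p with
  | nil => rfl
  | cons x xs ih =>
    by_cases hx : x ≤ k
    · simpa [pvIns, hx] using (ih.cons x).trans (List.Perm.swap k x xs)
    · simp [pvIns, hx]

theorem pvIns_pairwise (p : List Int) (k : Int) (h : p.Pairwise (· ≤ ·)) :
    (pvIns p k).Pairwise (· ≤ ·) := by
  induction p with
  | nil => simp [pvIns]
  | cons x xs ih =>
    rcases List.pairwise_cons.mp h with ⟨hx, hxs⟩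
    by_cases hk : x ≤ k
    · rw [show pvIns (x :: xs) k = x :: pvIns xs k from by simp [pvIns, hk]]
      refine List.pairwise_cons.mpr ⟨?_, ih hxs⟩
      intro y hy
      rcases List.mem_cons.mp ((pvIns_perm xs k).mem_iff.mp hy) with rfl | h1
      · exact hk
      · exact hx y h1
    · rw [show pvIns (x :: xs) k = k :: x :: xs from by simp [pvIns, hk]]
      refine List.pairwise_cons.mpr ⟨?_, h⟩
      intro y hy
      rcases List.mem_cons.mp hy with rfl | h1
      · omega
      · exact le_trans (le_of_lt (not_le.mp hk)) (hx y h1)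

theorem pvIns_length (p : List Int) (k : Int) : (pvIns p k).length = p.length + 1 := by
  induction p with
  | nil => rfl
  | cons x xs ih => by_cases hx : x ≤ k <;> simp [pvIns, hx, ih]

-- getD at the join of an append
theorem pv_getD_append (q : List Int) (l : List Int) (a : Int) :
    (q ++ a :: l).getD q.length 0 = a := by
  simp [List.getD_eq_getElem?_getD, List.getElem?_append_right (le_refl q.length)]

theorem pv_set_append (q : List Int) (l : List Int) (i : Nat) (x : Int) :
    (q ++ l).set (q.length + i) x = q ++ l.set i x := by
  induction q with
  | nil => simp
  | cons y ys ih =>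
    rw [List.cons_append, show (y :: ys).length + i = (ys.length + i) + 1 from by simp; omega,
      List.set_cons_succ, ih, List.cons_append]

-- the inner while loop plus the final write performs an ordered insert into the sorted prefix
theorem pvInner_spec (p : List Int) (c k : Int) (s : List Int) (hp : p.Pairwise (· ≤ ·)) :
    (pvInner (p ++ c :: s) k ((p.length : Int) - 1)).1.set
      ((pvInner (p ++ c :: s) k ((p.length : Int) - 1)).2 + 1).toNat k
      = pvIns p k ++ s := by
  induction p using List.reverseRecOn generalizing c s with
  | nil =>
    rw [pvInner]
    simp [pvIns]
  | append_singleton q a ih =>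
    have hq : q.Pairwise (· ≤ ·) := (List.pairwise_append.mp hp).1
    have hlen : ((q ++ [a]).length : Int) - 1 = (q.length : Int) := by simp
    have hj : (((q.length : Int)).toNat) = q.length := by simp
    have hget : ((q ++ [a]) ++ c :: s).getD ((q.length : Int)).toNat 0 = a := by
      rw [hj]; simpa using pv_getD_append q (a :: c :: s) a
    by_cases hk : k < a
    · rw [hlen, pvInner]
      have hcond : (0 : Int) ≤ (q.length : Int) ∧ k < ((q ++ [a]) ++ c :: s).getD ((q.length : Int)).toNat 0 := by
        exact ⟨by positivity, by rw [hget]; exact hk⟩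
      rw [dif_pos hcond]
      have hset : (((q ++ [a]) ++ c :: s).set ((q.length : Int) + 1).toNat
          (((q ++ [a]) ++ c :: s).getD ((q.length : Int)).toNat 0)) = q ++ a :: a :: s := by
        rw [hget]
        have : ((q.length : Int) + 1).toNat = q.length + 1 := by omega
        rw [this]
        have := pv_set_append q (a :: c :: s) 1 a
        simpa using this
      rw [hset]
      have := ih a (a :: s) hq
      have harg : (q.length : Int) - 1 + 1 - 1 = (q.length : Int) - 1 := by ring
      simpa [pvIns_append_gt q a k hk] using this
    · rw [hlen, pvInner]
      have hcond : ¬ ((0 : Int) ≤ (q.length : Int) ∧ k < ((q ++ [a]) ++ c :: s).getD ((q.length : Int)).toNat 0) := by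
        rw [hget]; push_neg; intro _; exact not_lt.mp hk
      rw [dif_neg hcond]
      have hall : ∀ x ∈ q ++ [a], x ≤ k := by
        intro x hx
        rcases List.mem_append.mp hx with h1 | h1
        · exact le_trans ((List.pairwise_append.mp hp).2.2 x h1 a (by simp)) (not_lt.mp hk)
        · simp at h1; omega
      rw [pvIns_of_all_le _ _ hall]
      have : ((q.length : Int) + 1).toNat = q.length + 1 := by omega
      simp only [this]
      have := pv_set_append q (a :: c :: s) 1 k
      simpa using this

def pvBody (arr : List Int) (i : Int) : List Int :=
  let key := arr.getD i.toNat 0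
  let r := pvInner arr key (i - 1)
  r.1.set (r.2 + 1).toNat key

theorem pvOuter_spec (rest : List Int) : ∀ (S : List Int), S.Pairwise (· ≤ ·) →
    (PySem.List.pyRange (S.length : Int) ((S.length : Int) + rest.length) 1).foldl pvBody (S ++ rest)
      = rest.foldl pvIns S := by
  induction rest with
  | nil =>
    intro S _
    rw [show ((S.length : Int) + (([] : List Int).length : Int)) = (S.length : Int) from by simp,
      PySem.List.pyRange_one_eq_nil le_rfl]
    simp
  | cons c rest' ih =>
    intro S hS
    rw [PySem.List.pyRange_one_cons (by simp only [List.length_cons]; push_cast; omega)]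
    simp only [List.foldl_cons]
    have hkey : (S ++ c :: rest').getD ((S.length : Int)).toNat 0 = c := by
      simpa using pv_getD_append S (c :: rest') c
    have hbody : pvBody (S ++ c :: rest') (S.length : Int) = pvIns S c ++ rest' := by
      unfold pvBody
      rw [hkey]
      exact pvInner_spec S c c rest' hS
    rw [hbody]
    have hstep : (S.length : Int) + 1 = ((pvIns S c).length : Int) := by
      rw [pvIns_length]; push_cast; ring
    have hend : (S.length : Int) + (((c :: rest' : List Int)).length : Int)
        = ((pvIns S c).length : Int) + ((rest' : List Int).length : Int) := by
      simp only [pvIns_length, List.length_cons]; push_cast; ring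
    rw [hstep, hend]
    exact ih (pvIns S c) (pvIns_pairwise S c hS)

theorem pvFoldIns_perm (rest : List Int) : ∀ S : List Int, (rest.foldl pvIns S).Perm (S ++ rest) := by
  induction rest with
  | nil => intro S; simp
  | cons c rest' ih =>
    intro S
    have h2 : (c :: (S ++ rest')).Perm (S ++ c :: rest') := List.perm_middle.symm
    exact (ih (pvIns S c)).trans
      (((pvIns_perm S c).append_right rest').trans (by simpa using h2))

theorem pvFoldIns_pairwise (rest : List Int) : ∀ S : List Int, S.Pairwise (· ≤ ·) →
    (rest.foldl pvIns S).Pairwise (· ≤ ·) := by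
  induction rest with
  | nil => intro S h; simpa using h
  | cons c rest' ih => intro S h; exact ih _ (pvIns_pairwise S c h)

theorem pvSort_eq (xs : List Int) :
    pvInsertionSort xs = PySem.List.sorted xs (fun x => x) false := by
  cases xs with
  | nil =>
    have h0 : PySem.List.sorted ([] : List Int) (fun x => x) false = [] := rfl
    simp [pvInsertionSort, PySem.List.pyRange_one_eq_nil (show (0 : Int) ≤ 1 by norm_num), h0]
  | cons a rest =>
    have h1 : pvInsertionSort (a :: rest) = rest.foldl pvIns [a] := by
      unfold pvInsertionSort
      have : ((a :: rest).length : Int) = (([a] : List Int).length : Int) + rest.length := by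
        simp; push_cast; ring
      rw [this]
      exact pvOuter_spec rest [a] (by simp)
    rw [h1]
    have hperm : (rest.foldl pvIns [a]).Perm (a :: rest) := by
      simpa using pvFoldIns_perm rest [a]
    exact (PySem.List.sorted_id_eq_of_perm_of_pairwise (a :: rest) (rest.foldl pvIns [a]) hperm
      (pvFoldIns_pairwise rest [a] (by simp))).symm

-- common functional core: greedy count over an already nondecreasing list, with remaining budget
def pvGCount (b : Int) : List Int → Int
  | [] => 0
  | t :: ts => if t ≤ b then 1 + pvGCount (b - t) ts else 0

theorem pvGreedy_eq_gcount (m : Int) (ts : List Int) : ∀ (total cnt : Int),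
    pvGreedy m ts total cnt = cnt + pvGCount (m - total) ts := by
  induction ts with
  | nil => intro total cnt; simp [pvGreedy, pvGCount]
  | cons t ts' ih =>
    intro total cnt
    by_cases h : total + t ≤ m
    · rw [pvGreedy, if_pos h, ih (total + t) (cnt + 1), pvGCount, if_pos (by omega)]
      have : m - (total + t) = m - total - t := by ring
      rw [this]; ring
    · rw [pvGreedy, if_neg h, pvGCount, if_neg (by omega)]; ring

-- sorted of a nonempty list is its first minimum consed on sorted of the rest
theorem pvSorted_cons_min (xs : List Int) (t : Int)
    (hm : PySem.List.min? xs (fun x => x) = some t) :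
    PySem.List.sorted xs (fun x => x) false = t :: PySem.List.sorted (xs.erase t) (fun x => x) false := by
  have htmem : t ∈ xs := PySem.List.min?_mem hm
  have hmin : ∀ y ∈ xs, t ≤ y := fun y hy => PySem.List.min?_isMin hm y hy
  refine PySem.List.sorted_id_eq_of_perm_of_pairwise xs (t :: PySem.List.sorted (xs.erase t) (fun x => x) false) ?_ ?_
  · exact ((PySem.List.sorted_perm _ _ _).cons t).trans (List.perm_cons_erase htmem).symm
  · refine List.pairwise_cons.mpr ⟨?_, ?_⟩
    · intro y hy
      have : y ∈ xs.erase t := ((PySem.List.sorted_perm _ _ _).mem_iff).mp hy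
      exact hmin y (List.mem_of_mem_erase this)
    · simpa using PySem.List.sorted_pairwise (xs.erase t) (fun x => x)

theorem pvSelLoop_eq_gcount (k : Nat) : ∀ (xs : List Int), xs.length ≤ k → ∀ (b s : Int),
    pvSelLoop xs b s = s + pvGCount b (PySem.List.sorted xs (fun x => x) false) := by
  induction k with
  | zero =>
    intro xs hk b s
    have hxs : xs = [] := List.eq_nil_of_length_eq_zero (Nat.le_zero.mp hk)
    subst hxs
    rw [pvSelLoop]
    simp [PySem.List.min?, pvGCount,
      show PySem.List.sorted ([] : List Int) (fun x => x) false = [] from rfl]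
  | succ k ih =>
    intro xs hk b s
    rw [pvSelLoop]
    split
    · next heq =>
      have hxs : xs = [] := (PySem.List.min?_eq_none_iff xs (fun x => x)).mp heq
      subst hxs
      simp [pvGCount, show PySem.List.sorted ([] : List Int) (fun x => x) false = [] from rfl]
    · next t heq =>
      have htmem : t ∈ xs := PySem.List.min?_mem heq
      rw [pvSorted_cons_min xs t heq]
      by_cases hb : b < t
      · rw [if_pos hb, pvGCount, if_neg (by omega : ¬ t ≤ b)]
        ring
      · rw [if_neg hb]
        split
        · next heq2 =>
          exact absurd ((PySem.List.remove?_eq_none_iff xs t).mp heq2) (by simpa using htmem)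
        · next rest heq2 =>
          have h3 := PySem.List.remove?_eq_some_erase xs t htmem
          rw [heq2] at h3
          cases Option.some.inj h3
          have hlen : (xs.erase t).length ≤ k := by
            have := List.length_erase_of_mem htmem
            omega
          rw [ih (xs.erase t) hlen (b - t) (s + 1), pvGCount, if_pos (by omega : t ≤ b)]
          ring

-- ===== VERDICT (by name: the statement is the Claim_ definition above) =====
theorem max_problems_solved_spec : Claim_equal_max_problems_solved := by
  intro n m problem_times _
  unfold Spec_max_problems_solved max_problems_solved max_problems_solved_alt
  rw [pvSort_eq, pvGreedy_eq_gcount m _ 0 0,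
    pvSelLoop_eq_gcount problem_times.length problem_times le_rfl m 0]
  norm_num
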